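-- pv_equiv track=rewrite | github.com/TotallyNotChase/funky-prime-generator | near-rep-digit/python/sieve_and_str_check.py | is_near_rep
-- ===== SOURCE A (Python) =====
-- def is_near_rep(num):
--     # Check if the number is a near rep digit number
--     numstr = str(num)
--     if len(numstr) < 3:
--         # Near rep digit numbers must be at least 3 digits
--         return False
--     """
--       Find the common character in the first few digits
--       i.e if we feed in 9999899, the common char is 9
--     """
--     if numstr[0] == numstr[1] or numstr[0] == numstr[2]:
--         commonchar = numstr[0]
--     elif numstr[1] == numstr[2]:
--         commonchar = numstr[1];
--     else:
--         # If no common character is found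
--         # i.e 968999 or 988999
--         return False
--     """
--       The above conditional statements will still find a common char
--       even if the number is 99986574, this is why we loop through for
--       additional checks
--     """
--     unqcharcount = 0
--     for i in numstr:
--     # Checks for multiple unique digits
--     # i.e digits that are not common digits
--         if i != commonchar:
--             unqcharcount += 1
--         if unqcharcount > 1:
--             break
--     if unqcharcount == 1:
--         # Must have exactly one unique digit
--         return True
--     else:
--         return False
-- ===== SOURCE B (Python) =====
-- def is_near_rep(num):
--     # Tally every character of str(num) once; near-repdigit iff the tally has
--     # exactly two distinct characters and the rarer one occurs exactly once.
--     numstr = str(num)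
--     if len(numstr) < 3:
--         return False
--     freq = {}
--     for ch in numstr:
--         freq[ch] = freq.get(ch, 0) + 1
--     return len(freq) == 2 and min(freq.values()) == 1
-- ===== Notes on version B (the rewrite author's own statement) =====
-- stated objective: idiomatic
-- what changed: Replaces A's common-char selection among the first three digits plus an early-exit counting loop with a single frequency tally of str(num), returning True iff it has exactly two distinct characters and the minority count is 1.
import Mathlib
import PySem

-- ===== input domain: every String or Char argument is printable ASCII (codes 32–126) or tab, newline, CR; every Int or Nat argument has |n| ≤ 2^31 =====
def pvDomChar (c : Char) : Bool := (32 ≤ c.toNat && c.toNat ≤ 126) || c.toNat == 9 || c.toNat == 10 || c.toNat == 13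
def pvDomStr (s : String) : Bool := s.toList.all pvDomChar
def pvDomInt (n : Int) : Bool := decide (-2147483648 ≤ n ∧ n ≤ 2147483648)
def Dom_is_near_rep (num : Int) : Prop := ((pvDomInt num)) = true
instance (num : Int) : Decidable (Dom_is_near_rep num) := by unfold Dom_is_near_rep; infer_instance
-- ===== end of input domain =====

-- B replaces A's first-three-digits common-char selection + early-exit counting loop with one
-- frequency tally of str(num) inspected by a predicate (exactly 2 distinct chars, minority count 1);
-- objective: more idiomatic, same O(n) cost.

-- ===== PORT A =====
-- the 'for i in numstr' loop with its 'break' once unqcharcount > 1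
def pvLoopA (common : Char) : List Char → Int → Int
  | [], cnt => cnt
  | c :: rest, cnt =>
    let cnt' := if c ≠ common then cnt + 1 else cnt
    if cnt' > 1 then cnt' else pvLoopA common rest cnt'

def pvBodyA : List Char → Bool
  | c0 :: c1 :: c2 :: rest =>
    if c0 = c1 ∨ c0 = c2 then decide (pvLoopA c0 (c0 :: c1 :: c2 :: rest) 0 = 1)
    else if c1 = c2 then decide (pvLoopA c1 (c0 :: c1 :: c2 :: rest) 0 = 1)
    else false
  | _ => false   -- len(numstr) < 3

def is_near_rep (num : Int) : Bool := pvBodyA (PySem.Int.toChars num)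

-- ===== PORT B =====
def pvBodyB (cs : List Char) : Bool :=
  if cs.length < 3 then false
  else
    let freq := cs.foldl (fun d c => d.insert c (d.getD c 0 + 1)) (PySem.Dict.empty : PySem.Dict Char Int)
    (freq.size == 2) && (PySem.List.min? freq.values (fun x => x) == some (1 : Int))

def is_near_rep_alt (num : Int) : Bool := pvBodyB (PySem.Int.toChars num)

-- ===== PRECONDITION & SPEC =====
def Spec_is_near_rep (num : Int) (out : Bool) : Prop := out = is_near_rep_alt num
instance (num : Int) (out : Bool) : Decidable (Spec_is_near_rep num out) := by unfold Spec_is_near_rep; infer_instance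

-- ===== CLAIM (what is proved, stated in full; the proofs are below) =====
def Claim_equal_is_near_rep : Prop := ∀ (num : Int), Dom_is_near_rep num → Spec_is_near_rep num (is_near_rep num)

-- ===== LEMMAS AND PROOFS =====

-- A's loop computes the count of characters differing from `common`, truncated at 2
theorem pvLoopA_eq (common : Char) (cs : List Char) (a : Int) (h0 : 0 ≤ a) (h1 : a ≤ 1) :
    pvLoopA common cs a = min (a + (cs.countP (fun c => c ≠ common) : Int)) 2 := by
  induction cs generalizing a with
  | nil => simp [pvLoopA]; omega
  | cons c rest ih =>
    by_cases hc : c = common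
    · have hng : ¬ (a > 1) := by omega
      simp only [pvLoopA, hc, ne_eq, not_true_eq_false, if_false, hng, List.countP_cons,
        decide_not, decide_true, Bool.not_true]
      simpa using ih a h0 h1
    · by_cases ha : a + 1 > 1
      · simp only [pvLoopA, hc, ne_eq, not_false_eq_true, if_true, ha, List.countP_cons]
        simp
        omega
      · simp only [pvLoopA, hc, ne_eq, not_false_eq_true, if_true, ha, List.countP_cons]
        have := ih (a + 1) (by omega) (by omega)
        simp at this ⊢
        rw [this]; ring_nf

-- a two-character alphabet partitions the length into the two counts
theorem pv_count_partition (cs : List Char) (a b : Char) (hab : a ≠ b)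
    (hmem : ∀ x ∈ cs, x = a ∨ x = b) :
    cs.count a + cs.count b = cs.length := by
  have h1 : cs.countP (fun x => x ≠ a) = cs.count b := by
    rw [List.count]
    refine List.countP_congr ?_
    intro x hx
    rcases hmem x hx with h | h <;> subst h <;> simp [hab, Ne.symm hab]
  have h2 : cs.countP (fun x => x ≠ a) + cs.count a = cs.length := by
    have h1' : cs.countP (fun x => x ≠ a) = cs.countP (fun x => decide ¬((x == a) = true)) :=
      List.countP_congr (by intro x _; simp)
    have h2' := List.length_eq_countP_add_countP (p := fun x : Char => x == a) (l := cs)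
    rw [h1', List.count]; omega
  omega

-- central characterisation: for a char occurring at least twice, "exactly one char differs"
-- is "exactly two distinct chars and the minimum count is 1"
theorem pv_core (cs : List Char) (c : Char) (hc : 2 ≤ cs.count c) :
    (cs.countP (fun x => x ≠ c) = 1) ↔
      ((PySem.Set.ofList cs).length = 2 ∧
        PySem.List.min? ((PySem.Set.ofList cs).map (fun k => (cs.count k : Int))) (fun x => x) = some (1 : Int)) := by
  have hcountP : cs.countP (fun x => x ≠ c) + cs.count c = cs.length := by
    have h1' : cs.countP (fun x => x ≠ c) = cs.countP (fun x => decide ¬((x == c) = true)) :=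
      List.countP_congr (by intro x _; simp)
    have h2' := List.length_eq_countP_add_countP (p := fun x : Char => x == c) (l := cs)
    rw [h1', List.count]; omega
  have hnodup := PySem.Set.nodup_ofList cs
  constructor
  · intro h1
    have hfil : (cs.filter (fun x => x ≠ c)).length = 1 := by
      rw [← List.countP_eq_length_filter]; exact h1
    obtain ⟨u, hu⟩ := List.length_eq_one_iff.mp hfil
    have huc : u ≠ c := by
      have hm : u ∈ cs.filter (fun x => x ≠ c) := by rw [hu]; simp
      simpa using List.of_mem_filter hm
    have humem : u ∈ cs := by
      have hm : u ∈ cs.filter (fun x => x ≠ c) := by rw [hu]; simp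
      exact List.mem_of_mem_filter hm
    have hOnly : ∀ x ∈ cs, x = c ∨ x = u := by
      intro x hx
      by_cases hxc : x = c
      · exact Or.inl hxc
      · refine Or.inr ?_
        have hm : x ∈ cs.filter (fun y => y ≠ c) := List.mem_filter.mpr ⟨hx, by simp [hxc]⟩
        rw [hu] at hm; simpa using hm
    have hcmem : c ∈ cs := List.count_pos_iff.mp (by omega)
    have hSsub : PySem.Set.ofList cs ⊆ [c, u] := by
      intro x hx
      rcases hOnly x ((PySem.Set.mem_ofList cs x).mp hx) with h | h <;> simp [h]
    have hcuN : ([c, u] : List Char).Nodup := by simp [Ne.symm huc]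
    have hsub2 : ([c, u] : List Char) ⊆ PySem.Set.ofList cs := by
      intro x hx
      simp only [List.mem_cons, List.not_mem_nil, or_false] at hx
      rcases hx with h | h <;> subst h <;> exact (PySem.Set.mem_ofList _ _).mpr (by assumption)
    have hSlen : (PySem.Set.ofList cs).length = 2 := le_antisymm
      (by simpa using (List.subperm_of_subset hnodup hSsub).length_le)
      (by simpa using (List.subperm_of_subset hcuN hsub2).length_le)
    refine ⟨hSlen, ?_⟩
    have hcu1 : cs.count u = 1 := by
      have h := List.count_filter (p := fun x => decide (x ≠ c)) (a := u) (l := cs) (by simp [huc])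
      rw [hu] at h
      simpa using h.symm
    obtain ⟨a, b, hS⟩ := List.length_eq_two.mp hSlen
    have hab : a ≠ b := by
      have := hS ▸ hnodup; simpa using this
    have hamem : a ∈ cs := (PySem.Set.mem_ofList cs a).mp (by rw [hS]; simp)
    have hbmem : b ∈ cs := (PySem.Set.mem_ofList cs b).mp (by rw [hS]; simp)
    rw [hS]
    simp only [List.map_cons, List.map_nil, PySem.List.min?_id_cons, List.foldl_cons,
      List.foldl_nil, Option.some_inj]
    rcases hOnly a hamem with ha | ha <;> rcases hOnly b hbmem with hb | hb <;>
      first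
      | (exfalso; subst ha; subst hb; exact hab rfl)
      | (subst ha; subst hb; omega)
  · rintro ⟨hlen2, hmin⟩
    obtain ⟨a, b, hS⟩ := List.length_eq_two.mp hlen2
    have hab : a ≠ b := by
      have := hS ▸ hnodup; simpa using this
    have hamem : a ∈ cs := (PySem.Set.mem_ofList cs a).mp (by rw [hS]; simp)
    have hbmem : b ∈ cs := (PySem.Set.mem_ofList cs b).mp (by rw [hS]; simp)
    have hOnly : ∀ x ∈ cs, x = a ∨ x = b := by
      intro x hx
      have hm : x ∈ PySem.Set.ofList cs := (PySem.Set.mem_ofList cs x).mpr hx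
      rw [hS] at hm; simpa using hm
    have hpart := pv_count_partition cs a b hab hOnly
    rw [hS] at hmin
    simp only [List.map_cons, List.map_nil, PySem.List.min?_id_cons, List.foldl_cons,
      List.foldl_nil, Option.some_inj] at hmin
    have hca : 0 < cs.count a := List.count_pos_iff.mpr hamem
    have hcb : 0 < cs.count b := List.count_pos_iff.mpr hbmem
    have hcmem : c ∈ cs := List.count_pos_iff.mp (by omega)
    rcases hOnly c hcmem with h | h <;> subst h <;> omega

-- one common-char branch of A against B's tally predicate
theorem pv_branch (cs : List Char) (c : Char) (hc : 2 ≤ cs.count c) :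
    decide (pvLoopA c cs 0 = 1) =
      (((PySem.Set.ofList cs).length == 2) &&
        (PySem.List.min? ((PySem.Set.ofList cs).map (fun k => (cs.count k : Int))) (fun x => x) == some (1 : Int))) := by
  rw [pvLoopA_eq c cs 0 le_rfl zero_le_one, Bool.eq_iff_iff]
  simp only [decide_eq_true_eq, Bool.and_eq_true, beq_iff_eq]
  rw [show (min (0 + (cs.countP (fun x => x ≠ c) : Int)) 2 = 1) ↔ (cs.countP (fun x => x ≠ c) = 1) by omega]
  exact pv_core cs c hc

theorem pvBody_eq (cs : List Char) : pvBodyA cs = pvBodyB cs := by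
  match cs with
  | [] => rfl
  | [a] => rfl
  | [a, b] => rfl
  | c0 :: c1 :: c2 :: rest =>
    have hlen3 : ¬ ((c0 :: c1 :: c2 :: rest).length < 3) := by simp
    rw [pvBodyB, if_neg hlen3]
    simp only [PySem.Dict.foldl_insert_getD_add_one_eq_counter, PySem.Dict.size, PySem.Dict.values,
      PySem.Dict.items_counter, List.length_map, List.map_map, Function.comp_def]
    by_cases h01 : c0 = c1 ∨ c0 = c2
    · rw [pvBodyA, if_pos h01]
      refine pv_branch _ c0 ?_
      rcases h01 with h | h <;> subst h <;> simp [List.count_cons] <;> split_ifs <;> omega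
    · rw [pvBodyA, if_neg h01]
      by_cases h12 : c1 = c2
      · rw [if_pos h12]
        refine pv_branch _ c1 ?_
        subst h12; simp [List.count_cons]; split_ifs with h <;> omega
      · rw [if_neg h12]
        push Not at h01
        have hnd : ([c0, c1, c2] : List Char).Nodup := by simp [h01.1, h01.2, h12]
        have hsub : ([c0, c1, c2] : List Char) ⊆ PySem.Set.ofList (c0 :: c1 :: c2 :: rest) := by
          intro x hx
          refine (PySem.Set.mem_ofList _ _).mpr ?_
          simp only [List.mem_cons, List.not_mem_nil, or_false] at hx
          rcases hx with h | h | h <;> subst h <;> simp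
        have h3 : 3 ≤ (PySem.Set.ofList (c0 :: c1 :: c2 :: rest)).length := by
          simpa using (List.subperm_of_subset hnd hsub).length_le
        have hne : ((PySem.Set.ofList (c0 :: c1 :: c2 :: rest)).length == 2) = false := by
          simp; omega
        rw [hne, Bool.false_and]

-- ===== VERDICT (by name: the statement is the Claim_ definition above) =====
theorem is_near_rep_spec : Claim_equal_is_near_rep := by
  intro num _
  unfold Spec_is_near_rep is_near_rep is_near_rep_alt
  exact pvBody_eq _
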